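-- pv_equiv track=rewrite | github.com/akshay-greenlang/Code-V1_GreenLang | greenlang/agents/eudr/chain_of_custody/transformation_tracker.py | _validate_commodity_transition
-- ===== SOURCE A (Python) =====
-- from typing import Any, Dict, FrozenSet, List, Optional, Sequence, Set, Tuple
--
-- COMMODITY_FORM_CHAINS: Dict[str, List[str]] = {
--     "cocoa": [
--         "cocoa", "cocoa_nibs", "cocoa_liquor", "cocoa_butter", "chocolate",
--     ],
--     "palm_oil": [
--         "ffb", "cpo", "rbd_palm_oil", "palm_olein",
--     ],
--     "coffee": [
--         "coffee", "green_coffee", "roasted_coffee", "ground_coffee",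
--     ],
--     "soya": [
--         "soya", "soya_oil", "soya_meal",
--     ],
--     "rubber": [
--         "latex", "rss", "crumb_rubber",
--     ],
--     "wood": [
--         "log", "sawn_timber", "plywood",
--     ],
--     "cattle": [
--         "live_cattle", "carcass", "beef", "leather",
--     ],
-- }
--
-- def _validate_commodity_transition(
--     input_commodity: str, output_commodity: str
-- ) -> bool:
--     """Check if a commodity form transition is recognized.
--
--     Args:
--         input_commodity: Input commodity/form.
--         output_commodity: Output commodity/form.
--
--     Returns:
--         True if the transition is in a known commodity form chain.
--     """
--     for chain in COMMODITY_FORM_CHAINS.values():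
--         try:
--             in_idx = chain.index(input_commodity)
--             out_idx = chain.index(output_commodity)
--             if out_idx > in_idx:
--                 return True
--         except ValueError:
--             continue
--     return False
-- ===== SOURCE B (Python) =====
-- COMMODITY_FORM_CHAINS = {
--     "cocoa": [
--         "cocoa", "cocoa_nibs", "cocoa_liquor", "cocoa_butter", "chocolate",
--     ],
--     "palm_oil": [
--         "ffb", "cpo", "rbd_palm_oil", "palm_olein",
--     ],
--     "coffee": [
--         "coffee", "green_coffee", "roasted_coffee", "ground_coffee",
--     ],
--     "soya": [
--         "soya", "soya_oil", "soya_meal",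
--     ],
--     "rubber": [
--         "latex", "rss", "crumb_rubber",
--     ],
--     "wood": [
--         "log", "sawn_timber", "plywood",
--     ],
--     "cattle": [
--         "live_cattle", "carcass", "beef", "leather",
--     ],
-- }
--
-- # Flat index built once: form -> (chain_key, position in that chain).
-- _FORM_INDEX = {
--     form: (chain_key, position)
--     for chain_key, chain in COMMODITY_FORM_CHAINS.items()
--     for position, form in enumerate(chain)
-- }
--
--
-- def _validate_commodity_transition(input_commodity, output_commodity):
--     src = _FORM_INDEX.get(input_commodity)
--     dst = _FORM_INDEX.get(output_commodity)
--     if src is None or dst is None: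
--         return False
--     return src[0] == dst[0] and dst[1] > src[1]
-- ===== Notes on version B (the rewrite author's own statement) =====
-- stated objective: simpler
-- what changed: Replaces the per-chain loop with repeated list.index scans (and try/except control flow) by one flat dict mapping each form to (chain_key, position), built once; the function becomes two direct lookups and a comparison.
import Mathlib
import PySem

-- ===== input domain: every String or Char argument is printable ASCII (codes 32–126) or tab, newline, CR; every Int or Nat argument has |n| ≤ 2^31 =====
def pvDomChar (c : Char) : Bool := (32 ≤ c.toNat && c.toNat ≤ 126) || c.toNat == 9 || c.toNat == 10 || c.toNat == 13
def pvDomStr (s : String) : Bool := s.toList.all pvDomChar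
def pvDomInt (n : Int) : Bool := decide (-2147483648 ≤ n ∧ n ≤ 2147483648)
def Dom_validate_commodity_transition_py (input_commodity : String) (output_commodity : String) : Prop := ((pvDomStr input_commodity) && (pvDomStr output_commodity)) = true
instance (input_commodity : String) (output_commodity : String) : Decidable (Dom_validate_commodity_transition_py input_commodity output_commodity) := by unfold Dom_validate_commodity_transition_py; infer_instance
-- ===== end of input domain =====

-- B replaces A's per-chain loop with list.index scans by one flat form -> (chain_key, position)
-- index built once; the function is two lookups and a comparison (objective: simpler).

-- ===== PORT A =====
-- COMMODITY_FORM_CHAINS.values(), in the dict's insertion order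
def pvChainsA : List (List String) :=
  [ ["cocoa", "cocoa_nibs", "cocoa_liquor", "cocoa_butter", "chocolate"],
    ["ffb", "cpo", "rbd_palm_oil", "palm_olein"],
    ["coffee", "green_coffee", "roasted_coffee", "ground_coffee"],
    ["soya", "soya_oil", "soya_meal"],
    ["latex", "rss", "crumb_rubber"],
    ["log", "sawn_timber", "plywood"],
    ["live_cattle", "carcass", "beef", "leather"] ]

-- the for-loop over chains: chain.index raises ValueError -> index? = none -> continue
def pvLoopA (input_commodity output_commodity : String) : List (List String) → Bool
  | [] => false
  | chain :: rest =>
    match PySem.List.index? chain input_commodity, PySem.List.index? chain output_commodity with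
    | some in_idx, some out_idx =>
        if out_idx > in_idx then true else pvLoopA input_commodity output_commodity rest
    | _, _ => pvLoopA input_commodity output_commodity rest

def validate_commodity_transition_py (input_commodity : String) (output_commodity : String) : Bool :=
  pvLoopA input_commodity output_commodity pvChainsA

-- ===== PORT B =====
-- COMMODITY_FORM_CHAINS.items(), in the dict's insertion order
def pvChainsKV : List (String × List String) :=
  [ ("cocoa", ["cocoa", "cocoa_nibs", "cocoa_liquor", "cocoa_butter", "chocolate"]),
    ("palm_oil", ["ffb", "cpo", "rbd_palm_oil", "palm_olein"]),
    ("coffee", ["coffee", "green_coffee", "roasted_coffee", "ground_coffee"]),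
    ("soya", ["soya", "soya_oil", "soya_meal"]),
    ("rubber", ["latex", "rss", "crumb_rubber"]),
    ("wood", ["log", "sawn_timber", "plywood"]),
    ("cattle", ["live_cattle", "carcass", "beef", "leather"]) ]

-- _FORM_INDEX: the flat dict comprehension, built once
def pvFormIndex : PySem.Dict String (String × Int) :=
  pvChainsKV.foldl
    (fun d kc =>
      (PySem.List.enumerate kc.2).foldl (fun d' pf => d'.insert pf.2 (kc.1, pf.1)) d)
    PySem.Dict.empty

def validate_commodity_transition_py_alt (input_commodity : String) (output_commodity : String) : Bool :=
  match pvFormIndex.get? input_commodity, pvFormIndex.get? output_commodity with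
  | some src, some dst => src.1 == dst.1 && dst.2 > src.2
  | _, _ => false

-- ===== PRECONDITION & SPEC =====
def Spec_validate_commodity_transition_py (input_commodity : String) (output_commodity : String) (out : Bool) : Prop := out = validate_commodity_transition_py_alt input_commodity output_commodity
instance (input_commodity : String) (output_commodity : String) (out : Bool) : Decidable (Spec_validate_commodity_transition_py input_commodity output_commodity out) := by unfold Spec_validate_commodity_transition_py; infer_instance

-- ===== CLAIM (what is proved, stated in full; the proofs are below) =====
def Claim_equal_validate_commodity_transition_py : Prop := ∀ (input_commodity : String) (output_commodity : String), Dom_validate_commodity_transition_py input_commodity output_commodity → Spec_validate_commodity_transition_py input_commodity output_commodity (validate_commodity_transition_py input_commodity output_commodity)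

-- ===== LEMMAS AND PROOFS =====

-- all 26 commodity forms
def pvForms : List String :=
  ["cocoa", "cocoa_nibs", "cocoa_liquor", "cocoa_butter", "chocolate",
   "ffb", "cpo", "rbd_palm_oil", "palm_olein",
   "coffee", "green_coffee", "roasted_coffee", "ground_coffee",
   "soya", "soya_oil", "soya_meal",
   "latex", "rss", "crumb_rubber",
   "log", "sawn_timber", "plywood",
   "live_cattle", "carcass", "beef", "leather"]

-- A's loop returns false when every chain misses one of the two forms
theorem pvLoopA_false (i o : String) (cs : List (List String))
    (h : ∀ c ∈ cs, i ∉ c ∨ o ∉ c) : pvLoopA i o cs = false := by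
  induction cs with
  | nil => rfl
  | cons c rest ih =>
    have hrest : pvLoopA i o rest = false := ih (fun c' hc' => h c' (by simp [hc']))
    rcases h c (by simp) with hm | hm
    · rw [pvLoopA, (PySem.List.index?_eq_none_iff _ _).mpr hm]
      cases PySem.List.index? c o <;> simpa using hrest
    · rw [pvLoopA, (PySem.List.index?_eq_none_iff _ _).mpr hm]
      cases PySem.List.index? c i <;> simpa using hrest

theorem pvChains_sub : ∀ c ∈ pvChainsA, ∀ s ∈ c, s ∈ pvForms := by decide

theorem pvKeys_sub : ∀ k ∈ pvFormIndex.keys, k ∈ pvForms := by decide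

theorem pvGet?_none (s : String) (h : s ∉ pvForms) : pvFormIndex.get? s = none := by
  rw [PySem.Dict.get?_eq_none_iff_not_mem_keys]
  exact fun hk => h (pvKeys_sub s hk)

theorem pvA_false_left (i o : String) (h : i ∉ pvForms) :
    validate_commodity_transition_py i o = false :=
  pvLoopA_false i o pvChainsA (fun c hc => Or.inl (fun hm => h (pvChains_sub c hc i hm)))

theorem pvA_false_right (i o : String) (h : o ∉ pvForms) :
    validate_commodity_transition_py i o = false :=
  pvLoopA_false i o pvChainsA (fun c hc => Or.inr (fun hm => h (pvChains_sub c hc o hm)))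

theorem pvB_false_left (i o : String) (h : i ∉ pvForms) :
    validate_commodity_transition_py_alt i o = false := by
  unfold validate_commodity_transition_py_alt
  rw [pvGet?_none i h]
theorem pvB_false_right (i o : String) (h : o ∉ pvForms) :
    validate_commodity_transition_py_alt i o = false := by
  unfold validate_commodity_transition_py_alt
  rw [pvGet?_none o h]
  cases pvFormIndex.get? i <;> rfl

-- ===== VERDICT (by name: the statement is the Claim_ definition above) =====
theorem validate_commodity_transition_py_spec : Claim_equal_validate_commodity_transition_py := by
  intro i o _
  unfold Spec_validate_commodity_transition_py
  by_cases hi : i ∈ pvForms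
  · by_cases ho : o ∈ pvForms
    · simp only [pvForms, List.mem_cons, List.not_mem_nil, or_false] at hi ho
      rcases hi with rfl|rfl|rfl|rfl|rfl|rfl|rfl|rfl|rfl|rfl|rfl|rfl|rfl|rfl|rfl|rfl|rfl|rfl|rfl|rfl|rfl|rfl|rfl|rfl|rfl|rfl <;>
        rcases ho with rfl|rfl|rfl|rfl|rfl|rfl|rfl|rfl|rfl|rfl|rfl|rfl|rfl|rfl|rfl|rfl|rfl|rfl|rfl|rfl|rfl|rfl|rfl|rfl|rfl|rfl <;>
        decide
    · rw [pvA_false_right i o ho, pvB_false_right i o ho]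
  · rw [pvA_false_left i o hi, pvB_false_left i o hi]
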